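-- pv_equiv track=rewrite | github.com/bgabrovsek/classification_bonded_knots | knotpy/algorithms/naming.py | number_to_alpha
-- ===== SOURCE A (Python) =====
-- import string
--
-- _BASE = len(string.ascii_letters)
--
-- def number_to_alpha(n: int) -> str:
--     """Convert an integer to its alphabetic name (0 -> 'a', 51 -> 'Z', 52 -> 'aa', ...)."""
--     if n < 0:
--         raise ValueError("n must be non-negative.")
--
--     length = 1
--     total = _BASE
--     remaining = n
--     while remaining >= total:
--         remaining -= total
--         length += 1
--         total = _BASE**length
--
--     chars: list[str] = []
--     for _ in range(length):
--         remaining, rem = divmod(remaining, _BASE)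
--         chars.append(string.ascii_letters[rem])
--     return "".join(reversed(chars))
-- ===== SOURCE B (Python) =====
-- import string
--
-- def number_to_alpha(n: int) -> str:
--     """Convert an integer to its alphabetic name (0 -> 'a', 51 -> 'Z', 52 -> 'aa', ...)."""
--     if n < 0:
--         raise ValueError("n must be non-negative.")
--     chars = []
--     m = n + 1
--     while m > 0:
--         m, rem = divmod(m - 1, 52)
--         chars.append(string.ascii_letters[rem])
--     return "".join(reversed(chars))
-- ===== Notes on version B (the rewrite author's own statement) =====
-- stated objective: simpler
-- what changed: Replaced A's two-phase conversion (a length-finding loop subtracting 52^k blocks followed by a fixed-length digit-extraction loop) with the classic single-pass bijective base-52 loop: shift to m = n+1 and repeatedly take divmod(m-1, 52).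
import Mathlib
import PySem

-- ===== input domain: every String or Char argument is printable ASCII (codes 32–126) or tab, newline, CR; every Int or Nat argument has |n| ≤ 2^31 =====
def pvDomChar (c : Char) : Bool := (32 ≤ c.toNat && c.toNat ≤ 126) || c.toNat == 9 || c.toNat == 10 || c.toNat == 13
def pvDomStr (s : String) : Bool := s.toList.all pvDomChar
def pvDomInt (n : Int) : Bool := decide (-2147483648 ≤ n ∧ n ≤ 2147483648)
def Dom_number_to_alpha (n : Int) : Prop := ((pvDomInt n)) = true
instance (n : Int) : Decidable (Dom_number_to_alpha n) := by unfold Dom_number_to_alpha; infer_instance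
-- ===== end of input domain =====

-- B replaces A's two-phase length-then-extract conversion by the classic single-pass
-- bijective base-52 loop (n+1, then repeatedly divmod(m-1, 52)); objective: simpler.

-- ===== PORT A =====
-- string.ascii_letters
def pvLetters : List Char :=
  "abcdefghijklmnopqrstuvwxyzABCDEFGHIJKLMNOPQRSTUVWXYZ".toList

-- A's `while remaining >= total` loop; the `0 < total` conjunct only makes the
-- recursion total (every reachable call has total = 52^length > 0).
def pvLenLoop (remaining : Int) (length : Nat) (total : Int) : Int × Nat :=
  if _h : total ≤ remaining ∧ 0 < total then
    pvLenLoop (remaining - total) (length + 1) ((52 : Int) ^ (length + 1))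
  else (remaining, length)
  termination_by remaining.toNat
  decreasing_by omega

-- A's `for _ in range(length)` digit loop; `string.ascii_letters[rem]` is in range
-- (0 ≤ rem < 52), so getD is exact.
def pvDigits : Nat → Int → List Char
  | 0, _ => []
  | k + 1, remaining =>
      pvLetters.getD (PySem.Int.mod remaining 52).toNat ' '
        :: pvDigits k (PySem.Int.floordiv remaining 52)

def number_to_alpha (n : Int) : String :=
  if n < 0 then ""  -- Python raises ValueError here; excluded by Pre_
  else
    let p := pvLenLoop n 1 52
    String.ofList ((pvDigits p.2 p.1).reverse)

-- ===== PORT B =====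
-- B's `while m > 0` bijective-base-52 loop.
def pvBij (m : Int) : List Char :=
  if _h : 0 < m then
    pvLetters.getD (PySem.Int.mod (m - 1) 52).toNat ' '
      :: pvBij (PySem.Int.floordiv (m - 1) 52)
  else []
  termination_by m.toNat
  decreasing_by
    rw [PySem.Int.floordiv_eq_ediv_of_pos (by norm_num)]
    have h1 : 0 ≤ (m - 1) / 52 := Int.ediv_nonneg (by omega) (by norm_num)
    have h2 : (m - 1) / 52 ≤ m - 1 := Int.ediv_le_self 52 (by omega)
    omega

def number_to_alpha_alt (n : Int) : String :=
  if n < 0 then ""  -- Python raises ValueError here; excluded by Pre_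
  else String.ofList ((pvBij (n + 1)).reverse)

-- ===== PRECONDITION & SPEC =====
-- Python A raises ValueError exactly on n < 0; Pre_ admits all other inputs.
def Pre_number_to_alpha (n : Int) : Prop := 0 ≤ n
instance (n : Int) : Decidable (Pre_number_to_alpha n) := by unfold Pre_number_to_alpha; infer_instance
def pvWitness_number_to_alpha : Int := (53)

def Spec_number_to_alpha (n : Int) (out : String) : Prop := out = number_to_alpha_alt n
instance (n : Int) (out : String) : Decidable (Spec_number_to_alpha n out) := by unfold Spec_number_to_alpha; infer_instance

-- ===== CLAIM (what is proved, stated in full; the proofs are below) =====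
def Claim_equal_number_to_alpha : Prop := ∀ (n : Int), Dom_number_to_alpha n → Pre_number_to_alpha n → Spec_number_to_alpha n (number_to_alpha n)

-- ===== LEMMAS AND PROOFS =====

-- pvGeo j = Σ_{i<j} 52^i, the block-count bookkeeping behind A's length loop
def pvGeo : Nat → Int
  | 0 => 0
  | j + 1 => 1 + 52 * pvGeo j

theorem pvGeo_nonneg : ∀ j, 0 ≤ pvGeo j
  | 0 => le_refl 0
  | j + 1 => by have := pvGeo_nonneg j; simp only [pvGeo]; omega

theorem pvGeo_mono {j k : Nat} (h : j ≤ k) : pvGeo j ≤ pvGeo k := by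
  induction k with
  | zero => simp_all
  | succ k ih =>
    rcases Nat.lt_or_ge j (k + 1) with hl | hg
    · have := ih (by omega)
      have := pvGeo_nonneg k
      simp only [pvGeo]; omega
    · have : j = k + 1 := by omega
      simp [this]

-- characterisation of A's length loop started at (r, k, 52^k)
theorem pvLenLoop_spec (r : Int) (k : Nat) (hr : 0 ≤ r) :
    ∃ j : Nat, pvLenLoop r k ((52:Int) ^ k) = (r - 52 ^ k * pvGeo j, k + j) ∧
      (52:Int) ^ k * pvGeo j ≤ r ∧ r < 52 ^ k * pvGeo (j + 1) := by
  have hp : (0:Int) < 52 ^ k := by positivity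
  by_cases h : (52:Int) ^ k ≤ r
  · obtain ⟨j, he, hlo, hhi⟩ := pvLenLoop_spec (r - 52 ^ k) (k + 1) (by omega)
    refine ⟨j + 1, ?_, ?_, ?_⟩
    · rw [pvLenLoop, dif_pos ⟨h, hp⟩, he]
      have hx : (52:Int) ^ k * pvGeo (j + 1) = 52 ^ k + 52 ^ (k + 1) * pvGeo j := by
        simp only [pvGeo]; ring
      simp only [Prod.mk.injEq]
      exact ⟨by omega, by omega⟩
    · have hx : (52:Int) ^ k * pvGeo (j + 1) = 52 ^ k + 52 ^ (k + 1) * pvGeo j := by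
        simp only [pvGeo]; ring
      omega
    · have hx : (52:Int) ^ k * pvGeo (j + 1 + 1) = 52 ^ k + 52 ^ (k + 1) * pvGeo (j + 1) := by
        simp only [pvGeo]; ring
      omega
  · refine ⟨0, ?_, ?_, ?_⟩
    · rw [pvLenLoop, dif_neg (by tauto)]
      simp [pvGeo]
    · simpa [pvGeo]
    · simpa [pvGeo] using lt_of_not_ge h
  termination_by r.toNat
  decreasing_by omega

-- the stopping index of the length loop is unique
theorem pvGeo_uniq (r : Int) {j₁ j₂ : Nat}
    (h1 : 52 * pvGeo j₁ ≤ r) (h2 : r < 52 * pvGeo (j₁ + 1))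
    (h3 : 52 * pvGeo j₂ ≤ r) (h4 : r < 52 * pvGeo (j₂ + 1)) : j₁ = j₂ := by
  by_contra hne
  rcases Nat.lt_or_ge j₁ j₂ with hl | hg
  · have := pvGeo_mono (show j₁ + 1 ≤ j₂ by omega); omega
  · have := pvGeo_mono (show j₂ + 1 ≤ j₁ by omega); omega

-- the heart: A's two loops compute the same letter list as B's single loop
theorem pvKey (n : Int) (hn : 0 ≤ n) :
    pvDigits (pvLenLoop n 1 52).2 (pvLenLoop n 1 52).1 = pvBij (n + 1) := by
  have h52 : ((52:Int) ^ 1) = 52 := by norm_num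
  by_cases hb : n < 52
  · -- single letter
    have hstop : pvLenLoop n 1 52 = (n, 1) := by
      rw [pvLenLoop, dif_neg (by omega)]
    rw [hstop]
    have hm : PySem.Int.mod n 52 = n := by
      rw [PySem.Int.mod_eq_emod_of_pos (by norm_num)]
      exact Int.emod_eq_of_lt hn hb
    have hd : PySem.Int.floordiv n 52 = 0 := by
      rw [PySem.Int.floordiv_eq_ediv_of_pos (by norm_num)]
      exact Int.ediv_eq_zero_of_lt hn hb
    rw [pvBij, dif_pos (by omega)]
    simp only [add_sub_cancel_right, hm, hd, pvDigits]
    rw [pvBij, dif_neg (by omega)]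
  · -- n ≥ 52: peel one digit and recurse
    rw [not_lt] at hb
    set q := n / 52 with hq
    have hq1 : 1 ≤ q := by rw [hq, Int.le_ediv_iff_mul_le (by norm_num)]; omega
    have hqle : q ≤ n := Int.ediv_le_self 52 hn
    -- B side: one step of pvBij
    have hBstep : pvBij (n + 1) =
        pvLetters.getD (PySem.Int.mod n 52).toNat ' ' :: pvBij q := by
      rw [pvBij, dif_pos (by omega)]
      simp only [add_sub_cancel_right]
      rw [PySem.Int.floordiv_eq_ediv_of_pos (by norm_num)]
    have ih := pvKey (q - 1) (by omega)
    have hq1' : q - 1 + 1 = q := by ring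
    rw [hq1'] at ih
    -- A side via the length-loop characterisation
    obtain ⟨j, he, hlo, hhi⟩ := pvLenLoop_spec n 1 hn
    rw [h52] at he hlo hhi
    have hj : j ≠ 0 := by
      rintro rfl
      simp only [pvGeo] at hhi
      omega
    obtain ⟨i, rfl⟩ : ∃ i, j = i + 1 := ⟨j - 1, by omega⟩
    obtain ⟨j₂, he₂, hlo₂, hhi₂⟩ := pvLenLoop_spec (q - 1) 1 (by omega)
    rw [h52] at he₂ hlo₂ hhi₂
    have hg1 : pvGeo (i + 1) = 1 + 52 * pvGeo i := rfl
    have hg2 : pvGeo (i + 1 + 1) = 1 + 52 * pvGeo (i + 1) := rfl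
    -- q - 1 lies in block i
    have hqlo : 52 * pvGeo i ≤ q - 1 := by
      have h' : pvGeo (i + 1) ≤ q := by
        rw [hq, Int.le_ediv_iff_mul_le (by norm_num)]; omega
      omega
    have hqhi : q - 1 < 52 * pvGeo (i + 1) := by
      have h' : q < pvGeo (i + 1 + 1) := by
        rw [hq, Int.ediv_lt_iff_lt_mul (by norm_num)]; omega
      omega
    have hji : j₂ = i := pvGeo_uniq (q - 1) hlo₂ hhi₂ hqlo hqhi
    subst hji
    have ih' : pvDigits (1 + j₂) ((q - 1) - 52 * pvGeo j₂) = pvBij q := by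
      rw [he₂] at ih; exact ih
    have hlen₂ : 1 + j₂ = j₂ + 1 := by omega
    rw [hlen₂] at ih'
    rw [he]
    show pvDigits (1 + (j₂ + 1)) (n - 52 * pvGeo (j₂ + 1)) = pvBij (n + 1)
    have hlen : 1 + (j₂ + 1) = j₂ + 1 + 1 := by omega
    rw [hlen, pvDigits]
    -- the peeled digit and the remaining quotient
    have hmod : PySem.Int.mod (n - 52 * pvGeo (j₂ + 1)) 52 = PySem.Int.mod n 52 := by
      rw [PySem.Int.mod_eq_emod_of_pos (by norm_num),
          PySem.Int.mod_eq_emod_of_pos (by norm_num)]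
      exact Int.sub_mul_emod_self_left (a := n) (b := 52) (c := pvGeo (j₂ + 1))
    have hdiv : PySem.Int.floordiv (n - 52 * pvGeo (j₂ + 1)) 52 =
        (q - 1) - 52 * pvGeo j₂ := by
      rw [PySem.Int.floordiv_eq_ediv_of_pos (by norm_num)]
      have hrw : n - 52 * pvGeo (j₂ + 1) = n + (-(pvGeo (j₂ + 1))) * 52 := by ring
      rw [hrw, Int.add_mul_ediv_right n (-(pvGeo (j₂ + 1))) (by norm_num)]
      rw [← hq, hg1]; ring
    rw [hmod, hdiv, hBstep, ih']
  termination_by n.toNat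
  decreasing_by
    have : 0 ≤ n / 52 := Int.ediv_nonneg hn (by norm_num)
    omega

-- ===== VERDICT (by name: the statement is the Claim_ definition above) =====
theorem number_to_alpha_spec : Claim_equal_number_to_alpha := by
  intro n _ hpre
  unfold Spec_number_to_alpha number_to_alpha number_to_alpha_alt
  rw [if_neg (not_lt.mpr hpre), if_neg (not_lt.mpr hpre)]
  show String.ofList (pvDigits (pvLenLoop n 1 52).2 (pvLenLoop n 1 52).1).reverse = _
  rw [pvKey n hpre]
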